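-- pv_equiv track=rewrite | github.com/Kayzels/aoc-2024 | day2/part2.py | dampen_line
-- ===== SOURCE A (Python) =====
-- def is_safe(a: list[int]) -> bool:
--     increasing = all(a[i] < a[i + 1] for i in range(len(a) - 1))
--     decreasing = all(a[i] > a[i + 1] for i in range(len(a) - 1))
--     diff_three = all(abs(a[i] - a[i + 1]) <= 3 for i in range(len(a) - 1))
--     return (increasing or decreasing) and diff_three
--
-- def dampen_line(a: list[int]) -> bool:
--     valid = False
--     for i in range(len(a)):
--         b = a.copy()
--         b.pop(i)
--         valid = is_safe(b)
--         if valid: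
--             break
--     return valid
-- ===== SOURCE B (Python) =====
-- def _mono(xs, lo, hi):
--     return all(lo <= y - x <= hi for x, y in zip(xs, xs[1:]))
--
-- def _damp_dir(a, lo, hi):
--     for i, (x, y) in enumerate(zip(a, a[1:])):
--         if not (lo <= y - x <= hi):
--             return (_mono(a[:i] + a[i + 1:], lo, hi)
--                     or _mono(a[:i + 1] + a[i + 2:], lo, hi))
--     return True
--
-- def dampen_line(a: list[int]) -> bool:
--     if not a:
--         return False
--     return _damp_dir(a, 1, 3) or _damp_dir(a, -3, -1)
-- ===== Notes on version B (the rewrite author's own statement) =====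
-- stated objective: faster
-- what changed: Instead of testing is_safe on every one-element-removed copy of the list, B finds (per monotone direction) the first adjacent pair whose difference is out of range and tests only the two candidate removals of that pair's endpoints.
import Mathlib
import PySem

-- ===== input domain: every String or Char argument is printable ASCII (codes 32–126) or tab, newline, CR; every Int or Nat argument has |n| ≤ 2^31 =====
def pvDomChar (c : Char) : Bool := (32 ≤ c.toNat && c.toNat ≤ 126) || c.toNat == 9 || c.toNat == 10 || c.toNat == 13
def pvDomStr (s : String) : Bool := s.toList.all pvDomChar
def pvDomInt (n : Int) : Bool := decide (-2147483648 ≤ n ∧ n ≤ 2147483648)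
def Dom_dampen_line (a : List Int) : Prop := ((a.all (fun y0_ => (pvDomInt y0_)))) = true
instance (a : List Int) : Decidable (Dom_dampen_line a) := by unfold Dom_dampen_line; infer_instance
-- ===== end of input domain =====

-- B replaces A's try-every-removal scan (is_safe on each of the n popped copies) by
-- locating, per direction, the first offending adjacent pair and testing only the two
-- candidate removals; a timing run decides whether this counts as measurably faster.

-- ===== PORT A =====
-- is_safe: three index-based `all` passes over range(len(a)-1), as in A.
-- a[i] is ported as pyGetD with default 0: every index produced by the range is in bounds.
def isSafeA (a : List Int) : Bool :=
  let increasing := (PySem.List.pyRange 0 ((a.length : Int) - 1) 1).all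
    (fun i => decide (PySem.List.pyGetD a i 0 < PySem.List.pyGetD a (i + 1) 0))
  let decreasing := (PySem.List.pyRange 0 ((a.length : Int) - 1) 1).all
    (fun i => decide (PySem.List.pyGetD a i 0 > PySem.List.pyGetD a (i + 1) 0))
  let diff_three := (PySem.List.pyRange 0 ((a.length : Int) - 1) 1).all
    (fun i => decide (|PySem.List.pyGetD a i 0 - PySem.List.pyGetD a (i + 1) 0| ≤ 3))
  (increasing || decreasing) && diff_three

-- A's loop: for i in range(len(a)): b = a.copy(); b.pop(i); valid = is_safe(b); if valid: break
def dampenLoopA (a : List Int) : List Int → Bool → Bool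
  | [], valid => valid
  | i :: rest, _ =>
    match PySem.List.pop? a i with
    | none => false   -- unreachable: i ∈ range(len(a)), so pop never raises
    | some (_, b) =>
      let valid := isSafeA b
      if valid then valid else dampenLoopA a rest valid

def dampen_line (a : List Int) : Bool :=
  dampenLoopA a (PySem.List.pyRange 0 (a.length : Int) 1) false

-- ===== PORT B =====
-- _mono(xs, lo, hi): all differences of adjacent pairs (via zip(xs, xs[1:])) within [lo, hi]
def monoB (xs : List Int) (lo hi : Int) : Bool :=
  (xs.zip (PySem.List.slice xs (some 1) none)).all
    (fun p => decide (lo ≤ p.2 - p.1) && decide (p.2 - p.1 ≤ hi))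

-- _damp_dir's loop over enumerate(zip(a, a[1:])): stop at first bad pair,
-- test the two candidate removals a[:i]+a[i+1:] and a[:i+1]+a[i+2:]
def dampDirLoopB (a : List Int) (lo hi : Int) : List (Int × (Int × Int)) → Bool
  | [] => true
  | (i, x, y) :: rest =>
    if !(decide (lo ≤ y - x) && decide (y - x ≤ hi)) then
      monoB (PySem.List.slice a none (some i) ++ PySem.List.slice a (some (i + 1)) none) lo hi ||
      monoB (PySem.List.slice a none (some (i + 1)) ++ PySem.List.slice a (some (i + 2)) none) lo hi
    else dampDirLoopB a lo hi rest

def dampDirB (a : List Int) (lo hi : Int) : Bool :=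
  dampDirLoopB a lo hi
    (PySem.List.enumerate (a.zip (PySem.List.slice a (some 1) none)) 0)

def dampen_line_alt (a : List Int) : Bool :=
  if a.isEmpty then false
  else dampDirB a 1 3 || dampDirB a (-3) (-1)

-- ===== PRECONDITION & SPEC =====
def Spec_dampen_line (a : List Int) (out : Bool) : Prop := out = dampen_line_alt a
instance (a : List Int) (out : Bool) : Decidable (Spec_dampen_line a out) := by unfold Spec_dampen_line; infer_instance

-- ===== CLAIM (what is proved, stated in full; the proofs are below) =====
def Claim_equal_dampen_line : Prop := ∀ (a : List Int), Dom_dampen_line a → Spec_dampen_line a (dampen_line a)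

-- ===== LEMMAS AND PROOFS =====

-- Spec-level predicate: every adjacent difference of l lies in [lo, hi].
def OkP (lo hi : Int) (l : List Int) : Prop :=
  ∀ k : Nat, (h : k + 1 < l.length) →
    lo ≤ l[k + 1]'h - l[k]'(Nat.lt_of_succ_lt h) ∧ l[k + 1]'h - l[k]'(Nat.lt_of_succ_lt h) ≤ hi

-- Proof-side mirror of B's scan: indices as Nat, the two slice-splices folded to eraseIdx.
def scanE (a : List Int) (lo hi : Int) : Nat → List (Int × Int) → Bool
  | _, [] => true
  | k, (x, y) :: rest =>
    if !(decide (lo ≤ y - x) && decide (y - x ≤ hi)) then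
      monoB (a.eraseIdx k) lo hi || monoB (a.eraseIdx (k + 1)) lo hi
    else scanE a lo hi (k + 1) rest

theorem all_pyRange_iff (n : Nat) (q : Int → Bool) :
    ((PySem.List.pyRange 0 ((n : Int) - 1) 1).all q = true) ↔
      ∀ k : Nat, k + 1 < n → q (k : Int) = true := by
  simp only [List.all_eq_true, PySem.List.mem_pyRange_one]
  constructor
  · intro h k hk
    exact h (k : Int) ⟨by positivity, by omega⟩
  · rintro h x ⟨hx0, hx1⟩
    have := h x.toNat (by omega)
    rwa [Int.toNat_of_nonneg hx0] at this

theorem getD_pair (a : List Int) (k : Nat) (h : k + 1 < a.length) :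
    PySem.List.pyGetD a (k : Int) 0 = a[k]'(Nat.lt_of_succ_lt h) ∧
    PySem.List.pyGetD a ((k : Int) + 1) 0 = a[k + 1]'h := by
  constructor
  · rw [PySem.List.pyGetD_natCast, List.getD_eq_getElem a 0 (Nat.lt_of_succ_lt h)]
  · have hcast : (k : Int) + 1 = ((k + 1 : Nat) : Int) := by push_cast; ring
    rw [hcast, PySem.List.pyGetD_natCast, List.getD_eq_getElem a 0 h]

theorem monoB_iff (lo hi : Int) (l : List Int) :
    monoB l lo hi = true ↔ OkP lo hi l := by
  unfold monoB OkP
  rw [PySem.List.slice_from_one]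
  simp only [List.all_eq_true, Bool.and_eq_true, decide_eq_true_eq]
  constructor
  · intro h k hk
    have hk' : k < (l.zip l.tail).length := by simp [List.length_zip]; omega
    have := h (l.zip l.tail)[k] (List.getElem_mem hk')
    rwa [List.getElem_zip, List.getElem_tail] at this
  · rintro h p hp
    obtain ⟨k, hk, rfl⟩ := List.mem_iff_getElem.mp hp
    have hk' : k + 1 < l.length := by simp [List.length_zip] at hk; omega
    rw [List.getElem_zip, List.getElem_tail]
    exact h k hk'

theorem isSafeA_iff (l : List Int) :
    isSafeA l = true ↔ (OkP 1 3 l ∨ OkP (-3) (-1) l) := by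
  unfold isSafeA
  simp only [Bool.and_eq_true, Bool.or_eq_true, all_pyRange_iff]
  constructor
  · rintro ⟨hmono | hmono, h3⟩
    · left; intro k hk
      obtain ⟨e1, e2⟩ := getD_pair l k hk
      have h1 := hmono k hk; have h2 := h3 k hk
      rw [e1, e2] at h1 h2
      simp only [decide_eq_true_eq, abs_le] at h1 h2
      omega
    · right; intro k hk
      obtain ⟨e1, e2⟩ := getD_pair l k hk
      have h1 := hmono k hk; have h2 := h3 k hk
      rw [e1, e2] at h1 h2
      simp only [decide_eq_true_eq, gt_iff_lt, abs_le] at h1 h2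
      omega
  · rintro (hok | hok)
    · refine ⟨Or.inl fun k hk => ?_, fun k hk => ?_⟩ <;>
      · obtain ⟨e1, e2⟩ := getD_pair l k hk
        have := hok k hk
        simp only [e1, e2, decide_eq_true_eq, abs_le]
        omega
    · refine ⟨Or.inr fun k hk => ?_, fun k hk => ?_⟩ <;>
      · obtain ⟨e1, e2⟩ := getD_pair l k hk
        have := hok k hk
        simp only [e1, e2, decide_eq_true_eq, gt_iff_lt, abs_le]
        omega

theorem dampenLoopA_eq_any (a : List Int) (is : List Nat) (hb : ∀ i ∈ is, i < a.length) :
    dampenLoopA a (is.map (fun k : Nat => (k : Int))) false =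
      is.any (fun i => isSafeA (a.eraseIdx i)) := by
  induction is with
  | nil => rfl
  | cons i rest ih =>
    have hi : i < a.length := hb i (List.mem_cons_self ..)
    rw [List.map_cons, List.any_cons]
    show (match PySem.List.pop? a (i : Int) with
      | none => false
      | some (_, b) =>
        let valid := isSafeA b
        if valid then valid else dampenLoopA a (rest.map (fun k : Nat => (k : Int))) valid) = _
    rw [PySem.List.pop?_natCast a i hi]
    cases h : isSafeA (a.eraseIdx i) with
    | true => simp [h]
    | false => simp [h, ih (fun j hj => hb j (List.mem_cons_of_mem _ hj))]

theorem dampen_line_eq_any (a : List Int) :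
    dampen_line a = (List.range a.length).any (fun i => isSafeA (a.eraseIdx i)) := by
  unfold dampen_line
  rw [PySem.List.pyRange_zero_nat]
  exact dampenLoopA_eq_any a (List.range a.length) (fun i hi => List.mem_range.mp hi)

theorem erase_slices (a : List Int) (k : Nat) :
    PySem.List.slice a none (some (k : Int)) ++ PySem.List.slice a (some ((k : Int) + 1)) none
      = a.eraseIdx k := by
  have h1 : (k : Int) + 1 = ((k + 1 : Nat) : Int) := by push_cast; ring
  rw [h1, PySem.List.slice_to a (by positivity), PySem.List.slice_from a (by positivity),
    Int.toNat_natCast, Int.toNat_natCast, List.eraseIdx_eq_take_drop_succ]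

theorem dampDirLoopB_eq_scanE (a : List Int) (lo hi : Int) (ps : List (Int × Int)) (k : Nat) :
    dampDirLoopB a lo hi (PySem.List.enumerate ps (k : Int)) = scanE a lo hi k ps := by
  induction ps generalizing k with
  | nil => rfl
  | cons p rest ih =>
    obtain ⟨x, y⟩ := p
    rw [PySem.List.enumerate_cons]
    show (if !(decide (lo ≤ y - x) && decide (y - x ≤ hi)) then _ else
      dampDirLoopB a lo hi (PySem.List.enumerate rest ((k : Int) + 1))) = _
    rw [show scanE a lo hi k ((x, y) :: rest) =
      (if !(decide (lo ≤ y - x) && decide (y - x ≤ hi)) then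
        monoB (a.eraseIdx k) lo hi || monoB (a.eraseIdx (k + 1)) lo hi
      else scanE a lo hi (k + 1) rest) from rfl]
    split
    · rw [erase_slices a k, show (k : Int) + 1 = ((k + 1 : Nat) : Int) by push_cast; ring,
        show ((k : Nat) : Int) + 2 = (((k + 1 : Nat)) : Int) + 1 by push_cast; ring,
        erase_slices a (k + 1)]
    · rw [show (k : Int) + 1 = ((k + 1 : Nat) : Int) by push_cast; ring, ih (k + 1)]

theorem okP_erase_last (lo hi : Int) (a : List Int) (hall : OkP lo hi a) :
    OkP lo hi (a.eraseIdx (a.length - 1)) := by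
  intro k hk
  have hlen : (a.eraseIdx (a.length - 1)).length ≤ a.length - 1 := by
    rw [List.length_eraseIdx]; split <;> omega
  have h1 : k + 1 < a.length := by omega
  rw [List.getElem_eraseIdx, List.getElem_eraseIdx, dif_pos (by omega), dif_pos (by omega)]
  exact hall k h1

-- a removal that is not one of the two candidates leaves the bad pair adjacent
theorem bad_pair_not_ok (lo hi : Int) (a : List Int) (i j : Nat)
    (hj : j + 1 < a.length) (hi' : i < a.length)
    (hbad : ¬(lo ≤ a[j + 1]'hj - a[j]'(by omega) ∧ a[j + 1]'hj - a[j]'(by omega) ≤ hi))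
    (hne : i ≠ j) (hne' : i ≠ j + 1) :
    ¬ OkP lo hi (a.eraseIdx i) := by
  intro hok
  have hlen : (a.eraseIdx i).length = a.length - 1 := by
    rw [List.length_eraseIdx]; split <;> omega
  rcases Nat.lt_or_ge i j with hij | hij
  · -- i < j : the bad pair sits at positions (j-1, j) of the erased list
    obtain ⟨k, rfl⟩ : ∃ k, j = k + 1 := ⟨j - 1, by omega⟩
    have := hok k (by omega)
    rw [List.getElem_eraseIdx, List.getElem_eraseIdx, dif_neg (by omega), dif_neg (by omega)] at this
    exact hbad this
  · -- i > j + 1 : the bad pair sits at positions (j, j+1) of the erased list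
    have := hok j (by omega)
    rw [List.getElem_eraseIdx, List.getElem_eraseIdx, dif_pos (by omega), dif_pos (by omega)] at this
    exact hbad this

theorem scanE_eq_any (a : List Int) (lo hi : Int) (l : List Int) (j : Nat)
    (hl : l = a.drop j)
    (hpre : ∀ k : Nat, (h : k + 1 < a.length) → k < j →
      lo ≤ a[k + 1]'h - a[k]'(Nat.lt_of_succ_lt h) ∧ a[k + 1]'h - a[k]'(Nat.lt_of_succ_lt h) ≤ hi)
    (hne : a ≠ []) :
    scanE a lo hi j (l.zip l.tail) =
      (List.range a.length).any (fun i => monoB (a.eraseIdx i) lo hi) := by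
  induction l generalizing j with
  | nil =>
    have hj : a.length ≤ j := by
      have := congrArg List.length hl; simp [List.length_drop] at this; omega
    refine (List.any_eq_true.mpr ⟨a.length - 1, ?_, ?_⟩).symm
    · exact List.mem_range.mpr (by have := List.length_pos_iff.mpr hne; omega)
    · exact (monoB_iff _ _ _).mpr (okP_erase_last lo hi a (fun k h => hpre k h (by omega)))
  | cons x l' IH =>
    cases l' with
    | nil =>
      have hj : a.length ≤ j + 1 := by
        have := congrArg List.length hl; simp [List.length_drop] at this; omega
      refine (List.any_eq_true.mpr ⟨a.length - 1, ?_, ?_⟩).symm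
      · exact List.mem_range.mpr (by have := List.length_pos_iff.mpr hne; omega)
      · exact (monoB_iff _ _ _).mpr (okP_erase_last lo hi a (fun k h => hpre k h (by omega)))
    | cons y t =>
      have hlen : j + 1 < a.length := by
        have := congrArg List.length hl; simp [List.length_drop] at this; omega
      have hx : a[j]'(by omega) = x := by
        have h1 : a[j + 0]? = some x := by
          rw [← List.getElem?_drop, ← hl]; rfl
        simp only [Nat.add_zero] at h1
        simpa [List.getElem?_eq_getElem (show j < a.length by omega)] using h1
      have hy : a[j + 1]'hlen = y := by
        have h1 : a[j + 1]? = some y := by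
          rw [← List.getElem?_drop, ← hl]; rfl
        simpa [List.getElem?_eq_getElem hlen] using h1
      have hdrop : y :: t = a.drop (j + 1) := by
        rw [← List.tail_drop, ← hl]; rfl
      show (if !(decide (lo ≤ y - x) && decide (y - x ≤ hi)) then
          monoB (a.eraseIdx j) lo hi || monoB (a.eraseIdx (j + 1)) lo hi
        else scanE a lo hi (j + 1) ((y :: t).zip (y :: t).tail)) = _
      by_cases hc : lo ≤ y - x ∧ y - x ≤ hi
      · rw [if_neg (by simp [hc.1, hc.2])]
        refine IH (j + 1) hdrop (fun k h hk => ?_)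
        rcases Nat.lt_or_ge k j with h' | h'
        · exact hpre k h h'
        · have hkj : k = j := by omega
          subst hkj
          rw [hx, hy]; exact hc
      · rw [if_pos (by revert hc; simp; omega)]
        rw [← hx, ← hy] at hc
        apply Bool.coe_iff_coe.mp
        simp only [Bool.or_eq_true, List.any_eq_true, List.mem_range]
        constructor
        · rintro (hm | hm)
          · exact ⟨j, by omega, hm⟩
          · exact ⟨j + 1, by omega, hm⟩
        · rintro ⟨i, hi', hm⟩
          by_cases h1 : i = j
          · subst h1; exact Or.inl hm
          by_cases h2 : i = j + 1
          · subst h2; exact Or.inr hm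
          · exact absurd ((monoB_iff _ _ _).mp hm)
              (bad_pair_not_ok lo hi a i j hlen hi' hc h1 h2)

-- ===== VERDICT (by name: the statement is the Claim_ definition above) =====
theorem dampen_line_spec : Claim_equal_dampen_line := by
  unfold Claim_equal_dampen_line Spec_dampen_line
  intro a _
  by_cases hne : a = []
  · subst hne; decide
  · have hB : dampen_line_alt a = (dampDirB a 1 3 || dampDirB a (-3) (-1)) := by
      unfold dampen_line_alt
      rw [if_neg (by simpa [List.isEmpty_iff] using hne)]
    have hD : ∀ lo hi : Int, dampDirB a lo hi = scanE a lo hi 0 (a.zip a.tail) := by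
      intro lo hi
      unfold dampDirB
      rw [PySem.List.slice_from_one,
        show (0 : Int) = ((0 : Nat) : Int) from rfl,
        dampDirLoopB_eq_scanE a lo hi (a.zip a.tail) 0]
    have hS : ∀ lo hi : Int, scanE a lo hi 0 (a.zip a.tail) =
        (List.range a.length).any (fun i => monoB (a.eraseIdx i) lo hi) :=
      fun lo hi => scanE_eq_any a lo hi a 0 List.drop_zero.symm
        (fun k h hk => absurd hk (Nat.not_lt_zero k)) hne
    rw [dampen_line_eq_any, hB, hD, hD, hS, hS]
    apply Bool.coe_iff_coe.mp
    simp only [Bool.or_eq_true, List.any_eq_true, List.mem_range]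
    constructor
    · rintro ⟨i, hi', hs⟩
      rcases (isSafeA_iff _).mp hs with h | h
      · exact Or.inl ⟨i, hi', (monoB_iff _ _ _).mpr h⟩
      · exact Or.inr ⟨i, hi', (monoB_iff _ _ _).mpr h⟩
    · rintro (⟨i, hi', hm⟩ | ⟨i, hi', hm⟩)
      · exact ⟨i, hi', (isSafeA_iff _).mpr (Or.inl ((monoB_iff _ _ _).mp hm))⟩
      · exact ⟨i, hi', (isSafeA_iff _).mpr (Or.inr ((monoB_iff _ _ _).mp hm))⟩
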